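-- pv_equiv track=rewrite | github.com/saropa/saropa_lints | scripts/generate_test_fixtures.py | extract_dartdoc_above
-- ===== SOURCE A (Python) =====
-- def extract_dartdoc_above(lines: list, class_line_idx: int) -> str:
--     """Extract the DartDoc comment block above a class declaration."""
--     doc_lines = []
--     i = class_line_idx - 1
--     while i >= 0:
--         stripped = lines[i].strip()
--         if stripped.startswith("///"):
--             doc_lines.insert(0, stripped)
--             i -= 1
--         elif stripped == "":
--             if doc_lines:
--                 doc_lines.insert(0, stripped)
--             i -= 1
--         else:
--             break
--     return "\n".join(doc_lines)
-- ===== SOURCE B (Python) =====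
-- def extract_dartdoc_above(lines: list, class_line_idx: int) -> str:
--     """Extract the DartDoc comment block above a class declaration."""
--     # Find the start of the contiguous run of '///' / blank lines above the class.
--     start = class_line_idx
--     while start - 1 >= 0:
--         s = lines[start - 1].strip()
--         if s.startswith("///") or s == "":
--             start -= 1
--         else:
--             break
--     # Collect forward, then drop trailing blank lines.
--     block = [lines[j].strip() for j in range(start, class_line_idx)]
--     while block and block[-1] == "":
--         block.pop()
--     return "\n".join(block)
-- ===== Notes on version B (the rewrite author's own statement) =====
-- stated objective: alternative
-- what changed: Replaces A's single upward scan with front-insertions and an in-loop blank-skipping rule by a boundary-find pass (walk the start index down past the '///'/blank run), a forward collection of stripped lines in natural order, and an explicit trailing-blank trim.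
-- outside the precondition, e.g. on extract_dartdoc_above([], 1): A raises IndexError, B raises IndexError
import Mathlib
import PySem

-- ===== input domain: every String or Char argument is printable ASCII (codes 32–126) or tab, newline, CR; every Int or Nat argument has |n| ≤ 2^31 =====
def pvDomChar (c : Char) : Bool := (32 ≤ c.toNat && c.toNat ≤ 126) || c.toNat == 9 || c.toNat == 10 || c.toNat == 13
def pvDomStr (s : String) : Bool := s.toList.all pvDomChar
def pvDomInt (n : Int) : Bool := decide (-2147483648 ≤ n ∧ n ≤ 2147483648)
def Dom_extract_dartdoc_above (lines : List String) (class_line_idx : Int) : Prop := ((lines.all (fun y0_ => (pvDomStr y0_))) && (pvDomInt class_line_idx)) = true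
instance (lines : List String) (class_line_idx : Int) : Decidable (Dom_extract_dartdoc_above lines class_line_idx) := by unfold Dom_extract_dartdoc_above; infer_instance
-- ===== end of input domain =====

-- B finds the start of the doc run first, then collects forward and trims trailing
-- blanks, instead of A's upward scan with front insertions (objective: simpler decomposition).

-- ===== PORT A =====
-- stripped = lines[i].strip()   (shared spelling of the stripped line at index i)
def pvStripAt (lines : List String) (i : Int) : String :=
  PySem.Str.strip (PySem.List.pyGetD lines i "")

-- the while loop of A: i scans upward, doc_lines is the accumulator (front insertion)
def pvLoopA (lines : List String) (i : Int) (acc : List String) : List String :=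
  if 0 ≤ i then
    if PySem.Str.startswith (pvStripAt lines i) "///" then
      pvLoopA lines (i - 1) (pvStripAt lines i :: acc)
    else if pvStripAt lines i == "" then
      if acc ≠ [] then pvLoopA lines (i - 1) (pvStripAt lines i :: acc)
      else pvLoopA lines (i - 1) acc
    else acc
  else acc
termination_by (i + 1).toNat
decreasing_by all_goals omega

def extract_dartdoc_above (lines : List String) (class_line_idx : Int) : String :=
  PySem.Str.join "\n" (pvLoopA lines (class_line_idx - 1) [])

-- ===== PORT B =====
-- B's first while loop: walk 'start' down while the line above is '///' or blank
def pvFindStart (lines : List String) (start : Int) : Int :=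
  if 0 ≤ start - 1 then
    if PySem.Str.startswith (pvStripAt lines (start - 1)) "///" || pvStripAt lines (start - 1) == "" then
      pvFindStart lines (start - 1)
    else start
  else start
termination_by start.toNat
decreasing_by omega

-- B's second while loop: pop trailing blank entries
def pvTrimTrail (block : List String) : List String :=
  if block.getLast? = some "" then pvTrimTrail block.dropLast else block
termination_by block.length
decreasing_by
  rename_i h
  have hne : block ≠ [] := by intro hnil; subst hnil; simp at h
  have : 0 < block.length := List.length_pos_iff.mpr hne
  simp [List.length_dropLast]; omega

def extract_dartdoc_above_alt (lines : List String) (class_line_idx : Int) : String :=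
  let start := pvFindStart lines class_line_idx
  let block := (PySem.List.pyRange start class_line_idx 1).map (fun j => pvStripAt lines j)
  PySem.Str.join "\n" (pvTrimTrail block)

-- ===== PRECONDITION & SPEC =====
-- Pre_ excludes exactly the inputs where A raises IndexError: class_line_idx - 1 beyond the list.
def Pre_extract_dartdoc_above (lines : List String) (class_line_idx : Int) : Prop :=
  class_line_idx ≤ (lines.length : Int)
instance (lines : List String) (class_line_idx : Int) : Decidable (Pre_extract_dartdoc_above lines class_line_idx) := by unfold Pre_extract_dartdoc_above; infer_instance

def pvWitness_extract_dartdoc_above : List String × Int := (["/// Doc.", "class A {}"], 1)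

def Spec_extract_dartdoc_above (lines : List String) (class_line_idx : Int) (out : String) : Prop := out = extract_dartdoc_above_alt lines class_line_idx
instance (lines : List String) (class_line_idx : Int) (out : String) : Decidable (Spec_extract_dartdoc_above lines class_line_idx out) := by unfold Spec_extract_dartdoc_above; infer_instance

-- ===== CLAIM (what is proved, stated in full; the proofs are below) =====
def Claim_equal_extract_dartdoc_above : Prop := ∀ (lines : List String) (class_line_idx : Int), Dom_extract_dartdoc_above lines class_line_idx → Pre_extract_dartdoc_above lines class_line_idx → Spec_extract_dartdoc_above lines class_line_idx (extract_dartdoc_above lines class_line_idx)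

-- ===== LEMMAS AND PROOFS =====

-- the run of stripped doc lines ending at index i, top-to-bottom, untrimmed
def pvCollect (lines : List String) (i : Int) : List String :=
  if 0 ≤ i then
    if PySem.Str.startswith (pvStripAt lines i) "///" || pvStripAt lines i == "" then
      pvCollect lines (i - 1) ++ [pvStripAt lines i]
    else []
  else []
termination_by (i + 1).toNat
decreasing_by omega

theorem pvTrimTrail_nil : pvTrimTrail [] = [] := by
  unfold pvTrimTrail; simp

theorem pvTrimTrail_append_ne (xs : List String) (s : String) (hs : s ≠ "") :
    pvTrimTrail (xs ++ [s]) = xs ++ [s] := by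
  unfold pvTrimTrail
  simp [hs]

theorem pvTrimTrail_append_blank (xs : List String) :
    pvTrimTrail (xs ++ [""]) = pvTrimTrail xs := by
  conv_lhs => rw [pvTrimTrail]
  simp

theorem startswith_ne_empty (s : String) (h : PySem.Str.startswith s "///" = true) : s ≠ "" := by
  intro hnil; subst hnil; revert h; decide

theorem pvLoopA_eq (lines : List String) (i : Int) (acc : List String) :
    pvLoopA lines i acc =
      if acc = [] then pvTrimTrail (pvCollect lines i) else pvCollect lines i ++ acc := by
  have hsw0 : PySem.Chars.startswith ([] : List Char) ['/', '/', '/'] = false := by decide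
  induction i, acc using pvLoopA.induct lines with
  | case1 i acc h0 hsw ih =>
    have hsw' := hsw
    simp at hsw'
    rw [pvLoopA, pvCollect, ih]
    by_cases hacc : acc = []
    · subst hacc
      simp [h0, hsw', pvTrimTrail_append_ne _ _ (startswith_ne_empty _ hsw)]
    · simp [h0, hsw', hacc]
  | case2 i acc h0 hsw hblank hne ih =>
    have hb : pvStripAt lines i = "" := by simpa using hblank
    rw [pvLoopA, pvCollect, ih, hb]
    simp [h0, hne, hsw0]
  | case3 i acc h0 hsw hblank hne ih =>
    have hacc : acc = [] := by simpa using hne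
    subst hacc
    have hb : pvStripAt lines i = "" := by simpa using hblank
    rw [pvLoopA, pvCollect, ih, hb]
    simp [h0, hsw0, pvTrimTrail_append_blank]
  | case4 i acc h0 hsw hblank =>
    have hsw' := hsw
    simp at hsw'
    have hb2 : pvStripAt lines i ≠ "" := by simpa using hblank
    rw [pvLoopA, pvCollect]
    by_cases hacc : acc = [] <;> simp [h0, hsw', hb2, hacc, pvTrimTrail_nil]
  | case5 i acc h0 =>
    rw [pvLoopA, pvCollect]
    by_cases hacc : acc = [] <;> simp [h0, hacc, pvTrimTrail_nil]

theorem pvFindStart_le (lines : List String) (start : Int) :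
    pvFindStart lines start ≤ start := by
  induction start using pvFindStart.induct lines with
  | case1 start h0 hdoc ih =>
    rw [pvFindStart, if_pos h0, if_pos hdoc]
    omega
  | case2 start h0 hdoc =>
    rw [pvFindStart, if_pos h0, if_neg hdoc]
  | case3 start h0 =>
    rw [pvFindStart, if_neg h0]

theorem pvFindStart_collect (lines : List String) (start : Int) :
    (PySem.List.pyRange (pvFindStart lines start) start 1).map (fun j => pvStripAt lines j) =
      pvCollect lines (start - 1) := by
  induction start using pvFindStart.induct lines with
  | case1 start h0 hdoc ih =>
    rw [pvFindStart, if_pos h0, if_pos hdoc, pvCollect, if_pos h0, if_pos hdoc]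
    have hle : pvFindStart lines (start - 1) ≤ start - 1 := pvFindStart_le lines (start - 1)
    have hsplit : PySem.List.pyRange (pvFindStart lines (start - 1)) start 1 =
        PySem.List.pyRange (pvFindStart lines (start - 1)) (start - 1) 1 ++ [start - 1] := by
      have := PySem.List.pyRange_one_succ_right (a := pvFindStart lines (start - 1))
        (b := start - 1) hle
      simpa using this
    rw [hsplit, List.map_append, ih]
    simp
  | case2 start h0 hdoc =>
    rw [pvFindStart, if_pos h0, if_neg hdoc, pvCollect, if_pos h0, if_neg hdoc]
    simp [PySem.List.pyRange_one_eq_nil (by omega : start ≤ start)]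
  | case3 start h0 =>
    rw [pvFindStart, if_neg h0, pvCollect, if_neg h0]
    simp [PySem.List.pyRange_one_eq_nil (by omega : start ≤ start)]

-- ===== VERDICT (by name: the statement is the Claim_ definition above) =====
theorem extract_dartdoc_above_spec : Claim_equal_extract_dartdoc_above := by
  intro lines idx _ _
  simp only [Spec_extract_dartdoc_above, extract_dartdoc_above, extract_dartdoc_above_alt]
  rw [pvLoopA_eq, if_pos rfl, pvFindStart_collect]
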